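-- pv_equiv track=rewrite | github.com/DavidCabestany/HAPLAP_Programming_introduction_ | 01_fundamentals/notebook/ex-03-09.py | red_and_blue_cars
-- ===== SOURCE A (Python) =====
-- def red_and_blue_cars(cars):
--     rCars = cars.split(' ')
--     blue = 0
--     red = 0
--
--     for car in rCars:
--         if car == 'blue':
--             blue += 1
--         if car == 'red':
--             red += 1
--
--     return red,blue
-- ===== SOURCE B (Python) =====
-- def red_and_blue_cars(cars):
--     red = 0
--     blue = 0
--     word = []
--     for ch in cars + ' ':
--         if ch == ' ':
--             w = ''.join(word)
--             if w == 'red':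
--                 red += 1
--             elif w == 'blue':
--                 blue += 1
--             word = []
--         else:
--             word.append(ch)
--     return red, blue
-- ===== Notes on version B (the rewrite author's own statement) =====
-- stated objective: alternative
-- what changed: Replaces split-into-words plus per-word comparison loop by a single character-level state machine over the string with a trailing space appended, building each word and classifying it at every space.
import Mathlib
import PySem

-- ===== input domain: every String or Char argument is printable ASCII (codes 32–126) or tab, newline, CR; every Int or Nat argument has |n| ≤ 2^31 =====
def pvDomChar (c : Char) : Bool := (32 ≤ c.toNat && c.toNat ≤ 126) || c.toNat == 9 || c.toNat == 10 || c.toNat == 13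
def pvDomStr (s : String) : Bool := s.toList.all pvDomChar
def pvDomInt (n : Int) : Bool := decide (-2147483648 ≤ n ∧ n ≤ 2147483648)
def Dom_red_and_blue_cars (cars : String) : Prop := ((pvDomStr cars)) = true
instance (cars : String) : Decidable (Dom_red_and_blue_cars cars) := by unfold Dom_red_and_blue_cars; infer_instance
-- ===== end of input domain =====

-- B replaces split-then-compare by a single character-level scan (state machine) over cars + ' '; alternative structure, same values.

-- ===== PORT A =====
def red_and_blue_cars (cars : String) : Int × Int :=
  let rCars := (PySem.Str.split? cars " ").getD []
  let s := rCars.foldl (fun (st : Int × Int) car =>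
    let blue := if car == "blue" then st.1 + 1 else st.1
    let red := if car == "red" then st.2 + 1 else st.2
    (blue, red)) (0, 0)
  (s.2, s.1)

-- ===== PORT B =====
-- one fold over the characters of cars ++ " "; state = (reversed current word, red, blue)
def rbStep (st : List Char × Int × Int) (ch : Char) : List Char × Int × Int :=
  if ch == ' ' then
    let w := String.ofList st.1.reverse
    if w == "red" then ([], st.2.1 + 1, st.2.2)
    else if w == "blue" then ([], st.2.1, st.2.2 + 1)
    else ([], st.2.1, st.2.2)
  else (ch :: st.1, st.2.1, st.2.2)

def red_and_blue_cars_alt (cars : String) : Int × Int :=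
  let st := (cars.toList ++ [' ']).foldl rbStep ([], 0, 0)
  (st.2.1, st.2.2)

-- ===== PRECONDITION & SPEC =====
def Spec_red_and_blue_cars (cars : String) (out : Int × Int) : Prop := out = red_and_blue_cars_alt cars
instance (cars : String) (out : Int × Int) : Decidable (Spec_red_and_blue_cars cars out) := by unfold Spec_red_and_blue_cars; infer_instance

-- ===== CLAIM (what is proved, stated in full; the proofs are below) =====
def Claim_equal_red_and_blue_cars : Prop := ∀ (cars : String), Dom_red_and_blue_cars cars → Spec_red_and_blue_cars cars (red_and_blue_cars cars)

-- ===== LEMMAS AND PROOFS =====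

-- A's word loop accumulates exactly the counts of "blue" and "red".
theorem foldl_count (ws : List String) (b r : Int) :
    ws.foldl (fun (st : Int × Int) car =>
      let blue := if car == "blue" then st.1 + 1 else st.1
      let red := if car == "red" then st.2 + 1 else st.2
      (blue, red)) (b, r)
    = (b + (ws.count "blue" : Int), r + (ws.count "red" : Int)) := by
  induction ws generalizing b r with
  | nil => simp
  | cons w ws ih =>
    simp only [List.foldl_cons, List.count_cons, ih]
    apply Prod.ext <;> simp <;> split_ifs <;> omega

theorem ofList_injective : Function.Injective String.ofList := by
  intro a b h
  have := congrArg String.toList h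
  simpa using this

-- step-by-step unfoldings of PySem.Chars.splitOn.go for sep = [' ']
theorem go_nil (n : Nat) (cur : List Char) (acc : List (List Char)) :
    PySem.Chars.splitOn.go [' '] (n+1) [] cur acc = (cur.reverse :: acc).reverse := by
  rw [PySem.Chars.splitOn.go]; omega

theorem go_space (n : Nat) (rest cur : List Char) (acc : List (List Char)) :
    PySem.Chars.splitOn.go [' '] (n+1) (' ' :: rest) cur acc
      = PySem.Chars.splitOn.go [' '] n rest [] (cur.reverse :: acc) := by
  rw [PySem.Chars.splitOn.go]
  simp [List.isPrefixOf]

theorem go_char (n : Nat) (c : Char) (rest cur : List Char) (acc : List (List Char))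
    (h : ¬ c = ' ') :
    PySem.Chars.splitOn.go [' '] (n+1) (c :: rest) cur acc
      = PySem.Chars.splitOn.go [' '] n rest (c :: cur) acc := by
  rw [PySem.Chars.splitOn.go]
  have hp : ([' '] : List Char).isPrefixOf (c :: rest) = false := by
    simp [List.isPrefixOf]; exact fun hc => absurd hc.symm h
  simp [hp]

-- splitOn.go's accumulator only prepends already-finished words.
theorem go_acc (fuel : Nat) : ∀ (l cur : List Char) (acc : List (List Char)),
    PySem.Chars.splitOn.go [' '] fuel l cur acc
      = acc.reverse ++ PySem.Chars.splitOn.go [' '] fuel l cur [] := by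
  induction fuel with
  | zero => intro l cur acc; simp [PySem.Chars.splitOn.go]
  | succ n ih =>
    intro l cur acc
    cases l with
    | nil => simp [go_nil]
    | cons c rest =>
      by_cases h : c = ' '
      · subst h
        rw [go_space, go_space, ih rest [] (cur.reverse :: acc), ih rest [] [cur.reverse]]
        simp
      · rw [go_char n c rest cur acc h, go_char n c rest cur [] h]
        exact ih rest (c :: cur) acc

theorem ofList_eq_red (l : List Char) : (String.ofList l == "red") = (l == ['r','e','d']) := by
  by_cases h : l = ['r','e','d']
  · subst h; rfl
  · have h1 : (l == ['r','e','d']) = false := by simp [h]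
    have h2 : (String.ofList l == "red") = false := by
      simp only [beq_eq_false_iff_ne, ne_eq]
      intro hc
      exact h (ofList_injective (hc.trans (by rfl)))
    rw [h1, h2]

theorem ofList_eq_blue (l : List Char) : (String.ofList l == "blue") = (l == ['b','l','u','e']) := by
  by_cases h : l = ['b','l','u','e']
  · subst h; rfl
  · have h1 : (l == ['b','l','u','e']) = false := by simp [h]
    have h2 : (String.ofList l == "blue") = false := by
      simp only [beq_eq_false_iff_ne, ne_eq]
      intro hc
      exact h (ofList_injective (hc.trans (by rfl)))
    rw [h1, h2]

-- The character scan computes the red/blue counts of the words splitOn produces.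
theorem scan_split (fuel : Nat) : ∀ (l cur : List Char) (r b : Int),
    l.length < fuel →
    (l ++ [' ']).foldl rbStep (cur, r, b)
      = ([], r + ((PySem.Chars.splitOn.go [' '] fuel l cur []).count ['r','e','d'] : Int),
             b + ((PySem.Chars.splitOn.go [' '] fuel l cur []).count ['b','l','u','e'] : Int)) := by
  induction fuel with
  | zero => intro l cur r b h; omega
  | succ n ih =>
    intro l cur r b h
    cases l with
    | nil =>
      rw [go_nil]
      simp only [List.nil_append, List.foldl_cons, List.foldl_nil, rbStep,
        ofList_eq_red, ofList_eq_blue, List.reverse_cons, List.reverse_nil,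
        List.nil_append, List.count_cons, List.count_nil]
      simp only [beq_iff_eq]
      split_ifs with h1 h2 <;> simp_all
    | cons c rest =>
      have hn : rest.length < n := by simpa using Nat.lt_of_succ_lt_succ h
      by_cases hc : c = ' '
      · subst hc
        rw [go_space, go_acc n rest [] [cur.reverse]]
        have := ih rest [] (r + (if cur.reverse = ['r','e','d'] then 1 else 0))
                  (b + (if cur.reverse = ['b','l','u','e'] then 1 else 0)) hn
        simp only [List.cons_append, List.foldl_cons, rbStep,
          ofList_eq_red, ofList_eq_blue, beq_iff_eq]
        split_ifs with h1 h2 <;>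
          simp_all <;> omega
      · rw [go_char n c rest cur [] hc]
        have := ih rest (c :: cur) r b hn
        simp only [List.cons_append, List.foldl_cons, rbStep, beq_iff_eq, hc, if_false]
        simpa using this

-- ===== VERDICT (by name: the statement is the Claim_ definition above) =====
theorem red_and_blue_cars_spec : Claim_equal_red_and_blue_cars := by
  intro cars _
  unfold Spec_red_and_blue_cars red_and_blue_cars red_and_blue_cars_alt
  have hsc := scan_split (cars.toList.length + 1) cars.toList [] 0 0 (Nat.lt_succ_self _)
  have hred : ((PySem.Chars.splitOn cars.toList [' ']).map String.ofList).count "red"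
      = (PySem.Chars.splitOn cars.toList [' ']).count ['r','e','d'] := by
    have := List.count_map_of_injective (PySem.Chars.splitOn cars.toList [' '])
      String.ofList ofList_injective ['r','e','d']
    simpa using this
  have hblue : ((PySem.Chars.splitOn cars.toList [' ']).map String.ofList).count "blue"
      = (PySem.Chars.splitOn cars.toList [' ']).count ['b','l','u','e'] := by
    have := List.count_map_of_injective (PySem.Chars.splitOn cars.toList [' '])
      String.ofList ofList_injective ['b','l','u','e']
    simpa using this
  simp only [PySem.Str.split?, PySem.Chars.split?]
  have hsep : (" " : String).toList = [' '] := rfl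
  rw [hsep]
  simp only [List.isEmpty_cons, Bool.false_eq_true, if_false, Option.map_some, Option.getD_some,
    foldl_count, hred, hblue]
  simp only [PySem.Chars.splitOn]
  rw [hsc]
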